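-- pv_equiv track=rewrite | github.com/zuriyaAnsbacher/AutoEncoder | utils_preprocessing.py | check_cdr3
-- ===== SOURCE A (Python) =====
-- def check_cdr3(seq):
--     chars = ['#', 'X', '*', '_']
--     if seq == '':
--         return False
--     for c in chars:
--         if c in seq:
--             return False
--     return True
-- ===== SOURCE B (Python) =====
-- def check_cdr3(seq):
--     if seq == '':
--         return False
--     bad = frozenset({'#', 'X', '*', '_'})
--     for ch in seq:
--         if ch in bad:
--             return False
--     return True
-- ===== Notes on version B (the rewrite author's own statement) =====
-- stated objective: idiomatic
-- what changed: Replaces four separate substring scans (one per forbidden character) with a single pass over the string that tests each character against a frozenset of forbidden characters.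
import Mathlib
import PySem

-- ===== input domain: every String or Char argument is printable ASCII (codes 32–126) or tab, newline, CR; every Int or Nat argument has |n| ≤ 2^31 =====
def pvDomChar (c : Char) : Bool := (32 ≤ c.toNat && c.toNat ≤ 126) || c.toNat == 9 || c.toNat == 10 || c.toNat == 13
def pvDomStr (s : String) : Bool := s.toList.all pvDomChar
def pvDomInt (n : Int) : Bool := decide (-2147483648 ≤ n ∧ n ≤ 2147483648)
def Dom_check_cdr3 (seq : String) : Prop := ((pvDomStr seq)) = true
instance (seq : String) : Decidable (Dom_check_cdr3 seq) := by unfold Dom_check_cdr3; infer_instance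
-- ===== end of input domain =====

-- B replaces A's four substring scans by one pass over the characters with a set of forbidden characters (idiomatic; same cost).


-- ===== PORT A =====
-- 'for c in chars: if c in seq: return False' as structural recursion over the literal list
def checkCdr3LoopA (seq : String) : List String → Bool
  | [] => true
  | c :: rest => if PySem.Str.isIn c seq then false else checkCdr3LoopA seq rest

def check_cdr3 (seq : String) : Bool :=
  let chars : List String := ["#", "X", "*", "_"]
  if seq == "" then false
  else checkCdr3LoopA seq chars

-- ===== PORT B =====
-- frozenset({'#','X','*','_'})
def cdr3Bad : PySem.Set Char := PySem.Set.ofList ['#', 'X', '*', '_']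

-- 'for ch in seq: if ch in bad: return False' as structural recursion over the characters
def checkCdr3LoopB : List Char → Bool
  | [] => true
  | ch :: rest => if ch ∈ cdr3Bad then false else checkCdr3LoopB rest

def check_cdr3_alt (seq : String) : Bool :=
  if seq == "" then false
  else checkCdr3LoopB seq.toList

-- ===== PRECONDITION & SPEC =====
def Spec_check_cdr3 (seq : String) (out : Bool) : Prop := out = check_cdr3_alt seq
instance (seq : String) (out : Bool) : Decidable (Spec_check_cdr3 seq out) := by unfold Spec_check_cdr3; infer_instance

-- ===== CLAIM (what is proved, stated in full; the proofs are below) =====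
def Claim_equal_check_cdr3 : Prop := ∀ (seq : String), Dom_check_cdr3 seq → Spec_check_cdr3 seq (check_cdr3 seq)

-- ===== LEMMAS AND PROOFS =====

-- A's loop returns true iff none of the listed one-char strings occurs in seq
theorem loopA_eq_true_iff (seq : String) (cs : List String) :
    checkCdr3LoopA seq cs = true ↔ ∀ c ∈ cs, PySem.Str.isIn c seq = false := by
  induction cs with
  | nil => simp [checkCdr3LoopA]
  | cons c rest ih =>
    simp only [checkCdr3LoopA]
    rcases h : PySem.Str.isIn c seq with _ | _
    · rw [if_neg Bool.false_ne_true]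
      constructor
      · intro ht c' hc'
        rcases List.mem_cons.mp hc' with rfl | hm
        · exact h
        · exact (ih.mp ht) c' hm
      · intro hall
        exact ih.mpr (fun c' hm => hall c' (List.mem_cons_of_mem _ hm))
    · rw [if_pos rfl]
      constructor
      · intro hf; exact absurd hf Bool.false_ne_true
      · intro hall
        have := hall c (List.mem_cons_self ..)
        rw [h] at this
        exact absurd this (by simp)

-- B's loop returns true iff no character of the list is a forbidden one
theorem loopB_eq_true_iff (l : List Char) :
    checkCdr3LoopB l = true ↔ ∀ ch ∈ l, ch ∉ cdr3Bad := by
  induction l with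
  | nil => simp [checkCdr3LoopB]
  | cons ch rest ih =>
    simp only [checkCdr3LoopB]
    by_cases h : ch ∈ cdr3Bad
    · simp [h]
    · simp [h, ih]

theorem mem_cdr3Bad_iff (ch : Char) : ch ∈ cdr3Bad ↔ ch ∈ ['#', 'X', '*', '_'] := by
  unfold cdr3Bad
  exact PySem.Set.mem_ofList _ _

-- ===== VERDICT (by name: the statement is the Claim_ definition above) =====
theorem check_cdr3_spec : Claim_equal_check_cdr3 := by
  intro seq _
  unfold Spec_check_cdr3 check_cdr3 check_cdr3_alt
  by_cases hemp : seq == ""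
  · simp [hemp]
  · simp only [hemp, if_false, Bool.false_eq_true]
    rcases hA : checkCdr3LoopA seq ["#", "X", "*", "_"] with _ | _
    · -- A's loop found a substring; show B's loop finds a forbidden char
      rcases hB : checkCdr3LoopB seq.toList with _ | _
      · rfl
      · exfalso
        rw [loopB_eq_true_iff] at hB
        have hA' : ¬ (∀ c ∈ ["#", "X", "*", "_"], PySem.Str.isIn c seq = false) := by
          intro h; rw [← loopA_eq_true_iff seq] at h; rw [hA] at h; exact Bool.false_ne_true h
        apply hA'
        intro c hc
        rw [Bool.eq_false_iff]
        intro hin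
        rw [PySem.Str.isIn_iff_infix] at hin
        fin_cases hc <;>
          · rw [show (String.toList _) = [_] from rfl, List.singleton_infix_iff] at hin
            exact hB _ hin (by rw [mem_cdr3Bad_iff]; decide)
    · -- A's loop found nothing; show B's loop finds nothing either
      rw [loopA_eq_true_iff] at hA
      rw [eq_comm, loopB_eq_true_iff]
      intro ch hch hbad
      rw [mem_cdr3Bad_iff] at hbad
      have hinf : [ch] <:+: seq.toList := (List.singleton_infix_iff ch seq.toList).mpr hch
      have key : ∀ c : String, c ∈ ["#", "X", "*", "_"] → c.toList = [ch] → False := by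
        intro c hc hl
        have hf := hA c hc
        have hni : ¬ c.toList <:+: seq.toList := by
          intro hi
          rw [← PySem.Str.isIn_iff_infix, hf] at hi
          exact Bool.false_ne_true hi
        rw [hl] at hni
        exact hni hinf
      fin_cases hbad
      · exact key "#" (by simp) rfl
      · exact key "X" (by simp) rfl
      · exact key "*" (by simp) rfl
      · exact key "_" (by simp) rfl
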